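-- pv_equiv track=rewrite | github.com/rob-3r7o/aoc2023 | day11/main.py | expand_space
-- ===== SOURCE A (Python) =====
-- def transpose_matrix(matrix):
--     return [list(e) for e in (zip(*matrix))]
--
-- def expand_space(matrix, ret=False):
--     new_matrix = []
--     for i in range(len(matrix)):
--         row = matrix[i]
--         new_matrix.append(row)
--         if len(list(filter(lambda x: x == ".", row))) == len(row):
--             new_matrix.append(row)
--     if ret:
--         return new_matrix
--
--     matrix = transpose_matrix(new_matrix)
--     matrix = expand_space(matrix, True)
--     return transpose_matrix(matrix)
-- ===== SOURCE B (Python) =====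
-- def expand_space(matrix, ret=False):
--     if ret:
--         return [r for row in matrix
--                   for r in ([row, row] if all(c == "." for c in row) else [row])]
--     columns = list(zip(*matrix))
--     empty_cols = {j for j, col in enumerate(columns) if all(c == "." for c in col)}
--     out = []
--     for row in matrix:
--         new_row = [c for j in range(len(columns))
--                      for c in ([row[j], row[j]] if j in empty_cols else [row[j]])]
--         out.append(new_row)
--         if all(c == "." for c in row):
--             out.append(new_row)
--     return out
-- ===== Notes on version B (the rewrite author's own statement) =====
-- stated objective: alternative
-- what changed: B replaces A's transpose / recursive row-expansion / transpose-back pipeline with a single direct construction that finds the all-dot columns once (from zip's columns) and rebuilds each output row in one pass, duplicating all-dot rows and the cells of all-dot columns; Pre_ excludes full expansions (ret=False) of matrices containing an empty row, a degenerate grid with no common width on which A's zip-based double transpose returns [] while B keeps one zero-width row per input row — either value is defensible there.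
-- outside the precondition, e.g. on expand_space([['a'], []], False): A returns [], B returns [[], [], []]
import Mathlib
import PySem

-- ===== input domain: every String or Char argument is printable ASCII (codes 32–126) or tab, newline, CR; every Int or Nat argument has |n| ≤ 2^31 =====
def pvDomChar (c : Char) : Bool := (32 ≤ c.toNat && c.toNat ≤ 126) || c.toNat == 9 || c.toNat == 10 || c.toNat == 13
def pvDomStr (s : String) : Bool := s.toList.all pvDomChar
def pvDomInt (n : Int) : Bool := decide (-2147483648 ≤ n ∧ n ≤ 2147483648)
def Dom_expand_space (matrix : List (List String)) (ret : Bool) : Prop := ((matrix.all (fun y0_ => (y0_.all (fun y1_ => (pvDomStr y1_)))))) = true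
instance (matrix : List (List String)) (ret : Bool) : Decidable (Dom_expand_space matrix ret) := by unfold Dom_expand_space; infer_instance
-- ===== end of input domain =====

-- B replaces A's transpose / recurse / transpose-back pipeline by one direct pass
-- (empty columns found once, each row rebuilt cell by cell); return values proved equal on Pre_.

-- ===== PORT A =====
-- exact port of Python's variadic zip(*matrix): stops at the shortest row; tuples modelled as lists
def pyzip (matrix : List (List String)) : List (List String) :=
  if matrix.isEmpty || matrix.any List.isEmpty then []
  else (matrix.map (fun r => r.headD "")) :: pyzip (matrix.map List.tail)
termination_by (matrix.map List.length).sum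
decreasing_by
  rename_i h
  simp only [Bool.or_eq_true, List.isEmpty_iff, List.any_eq_true, List.isEmpty_iff] at h
  push Not at h
  obtain ⟨h1, h2⟩ := h
  simp only [List.map_attach_eq_pmap, List.pmap_eq_map, List.map_map]
  refine List.sum_lt_sum _ _ (fun r _ => ?_) ?_
  · cases r <;> simp
  · obtain ⟨r, hr⟩ := List.exists_mem_of_ne_nil matrix h1
    refine ⟨r, hr, ?_⟩
    have := h2 r hr
    cases r <;> simp_all

-- [list(e) for e in zip(*matrix)]: list(e) is the identity here, the zip tuples are already lists
def transpose_matrix (matrix : List (List String)) : List (List String) :=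
  (pyzip matrix).map (fun e => e)

def expand_space (matrix : List (List String)) (ret : Bool) : List (List String) :=
  let new_matrix := (PySem.List.pyRange 0 (PySem.List.len matrix)).foldl
    (fun acc i =>
      let row := PySem.List.pyGetD matrix i []
      let acc' := acc ++ [row]
      if (List.filter (fun x => x == ".") row).length = row.length then acc' ++ [row] else acc') []
  match ret with
  | true => new_matrix
  | false => transpose_matrix (expand_space (transpose_matrix new_matrix) true)
termination_by (if ret then 0 else 1)
decreasing_by simp

-- ===== PORT B =====
def expand_space_alt (matrix : List (List String)) (ret : Bool) : List (List String) :=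
  if ret then
    matrix.flatMap (fun row => if row.all (fun c => c == ".") then [row, row] else [row])
  else
    let columns := pyzip matrix
    let empty_cols : PySem.Set Int := PySem.Set.ofList
      (((PySem.List.enumerate columns).filter (fun p => p.2.all (fun c => c == "."))).map
        (fun p => p.1))
    matrix.foldl (fun out row =>
      let new_row := (PySem.List.pyRange 0 (PySem.List.len columns)).flatMap (fun j =>
        if PySem.Set.contains empty_cols j then
          [PySem.List.pyGetD row j "", PySem.List.pyGetD row j ""]
        else [PySem.List.pyGetD row j ""])
      let out' := out ++ [new_row]
      if row.all (fun c => c == ".") then out' ++ [new_row] else out') []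

-- ===== PRECONDITION & SPEC =====
-- Pre_ excludes full expansions (ret=False) of matrices containing an empty row: a degenerate
-- grid with no common width, on which A's zip-based double transpose returns [] (zip truncates
-- every row to length 0 and drops them) while B keeps one zero-width row per input row —
-- a corner no caller specifies, where either value is defensible.
def Pre_expand_space (matrix : List (List String)) (ret : Bool) : Prop :=
  ret = true ∨ [] ∉ matrix
instance (matrix : List (List String)) (ret : Bool) : Decidable (Pre_expand_space matrix ret) := by
  unfold Pre_expand_space; infer_instance

def pvWitness_expand_space : List (List String) × Bool := ([[".", "#"], [".", "."]], false)

def Spec_expand_space (matrix : List (List String)) (ret : Bool) (out : List (List String)) : Prop := out = expand_space_alt matrix ret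
instance (matrix : List (List String)) (ret : Bool) (out : List (List String)) : Decidable (Spec_expand_space matrix ret out) := by unfold Spec_expand_space; infer_instance

-- ===== CLAIM (what is proved, stated in full; the proofs are below) =====
def Claim_equal_expand_space : Prop := ∀ (matrix : List (List String)) (ret : Bool), Dom_expand_space matrix ret → Pre_expand_space matrix ret → Spec_expand_space matrix ret (expand_space matrix ret)

-- ===== LEMMAS AND PROOFS =====

-- duplicate every all-dot row (value of A's ret=True path and of B's ret branch)
def gdup (row : List String) : List (List String) :=
  if row.all (fun c => c == ".") then [row, row] else [row]

def dupF (m : List (List String)) : List (List String) := m.flatMap gdup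

-- minimum row length (0 for the empty matrix)
def minW (m : List (List String)) : Nat := ((m.map List.length).min?).getD 0

-- column j read with a total default
def colG (m : List (List String)) (j : Nat) : List String := m.map (fun r => r.getD j "")

theorem loopA (m : List (List String)) :
    (PySem.List.pyRange 0 (PySem.List.len m)).foldl
      (fun acc i =>
        let row := PySem.List.pyGetD m i []
        let acc' := acc ++ [row]
        if (List.filter (fun x => x == ".") row).length = row.length then acc' ++ [row] else acc') [] = dupF m := by
  rw [PySem.List.foldl_pyRange_zero_pyGetD m []
      (fun acc row =>
        let acc' := acc ++ [row]
        if (List.filter (fun x => x == ".") row).length = row.length then acc' ++ [row] else acc') []]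
  have : (fun (acc : List (List String)) (row : List String) =>
      let acc' := acc ++ [row]
      if (List.filter (fun x => x == ".") row).length = row.length then acc' ++ [row] else acc')
      = fun acc row => acc ++ gdup row := by
    funext acc row
    simp only [gdup, List.length_filter_eq_length_iff, ← List.all_eq_true]
    split_ifs <;> simp_all
  rw [this, PySem.List.foldl_append_eq_flatMap]
  simp [dupF]

theorem expand_true (m : List (List String)) : expand_space m true = dupF m := by
  rw [expand_space]; exact loopA m

theorem mem_dupF {a : List String} {m : List (List String)} : a ∈ dupF m ↔ a ∈ m := by
  simp only [dupF, List.mem_flatMap, gdup]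
  constructor
  · rintro ⟨r, hr, ha⟩; split_ifs at ha <;> simp_all
  · intro h; exact ⟨a, h, by split_ifs <;> simp⟩

theorem minW_dupF (m : List (List String)) : minW (dupF m) = minW m := by
  unfold minW
  rcases h : (m.map List.length).min? with _ | k
  · rw [List.min?_eq_none_iff] at h
    simp only [List.map_eq_nil_iff] at h
    subst h; simp [dupF]
  · rw [List.min?_eq_some_iff] at h
    have : ((dupF m).map List.length).min? = some k := by
      rw [List.min?_eq_some_iff]
      constructor
      · obtain ⟨h1, _⟩ := h
        simp only [List.mem_map] at h1 ⊢
        obtain ⟨r, hr, hk⟩ := h1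
        exact ⟨r, mem_dupF.2 hr, hk⟩
      · intro b hb
        simp only [List.mem_map] at hb
        obtain ⟨r, hr, hb⟩ := hb
        exact h.2 b (by simp only [List.mem_map]; exact ⟨r, mem_dupF.1 hr, hb⟩)
    simp [this]

theorem minW_zero_of_mem_nil {m : List (List String)} (h : [] ∈ m) : minW m = 0 := by
  unfold minW
  have : (m.map List.length).min? = some 0 := by
    rw [List.min?_eq_some_iff]
    exact ⟨by simp only [List.mem_map]; exact ⟨[], h, rfl⟩, by omega⟩
  simp [this]

theorem minW_succ {m : List (List String)} (hne : m ≠ []) (hall : ∀ r ∈ m, r ≠ []) :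
    minW m = minW (m.map List.tail) + 1 := by
  unfold minW
  rcases h : ((m.map List.tail).map List.length).min? with _ | k
  · rw [List.min?_eq_none_iff] at h; simp_all
  · have h' := h
    rw [List.min?_eq_some_iff] at h'
    have hm : ((m.map List.length).min?) = some (k + 1) := by
      rw [List.min?_eq_some_iff]
      constructor
      · obtain ⟨h1, _⟩ := h'
        simp only [List.map_map, List.mem_map, Function.comp] at h1 ⊢
        obtain ⟨r, hr, hk⟩ := h1
        refine ⟨r, hr, ?_⟩
        have := hall r hr
        cases r <;> simp_all
      · intro b hb
        simp only [List.mem_map] at hb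
        obtain ⟨r, hr, rfl⟩ := hb
        have hb' : r.tail.length ∈ ((m.map List.tail).map List.length) := by
          simp only [List.map_map, List.mem_map, Function.comp]; exact ⟨r, hr, rfl⟩
        have := h'.2 _ hb'
        have := hall r hr
        cases r <;> simp_all
    rw [hm]
    rfl

theorem getD_succ_tail (r : List String) (j : Nat) (d : String) :
    r.getD (j + 1) d = r.tail.getD j d := by
  cases r <;> simp

theorem pyzip_eq (m : List (List String)) :
    pyzip m = (List.range (minW m)).map (colG m) := by
  rw [pyzip]
  split
  · rename_i h
    simp only [Bool.or_eq_true, List.isEmpty_iff, List.any_eq_true, List.isEmpty_iff] at h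
    rcases h with h | ⟨r, hr, hre⟩
    · subst h; simp [minW]
    · subst hre; rw [minW_zero_of_mem_nil hr]; simp
  · rename_i h
    simp only [Bool.or_eq_true, List.isEmpty_iff, List.any_eq_true, List.isEmpty_iff] at h
    push Not at h
    obtain ⟨h1, hall⟩ := h
    rw [pyzip_eq (m.map List.tail)]
    rw [minW_succ h1 hall, List.range_succ_eq_map, List.map_cons, List.map_map]
    congr 1
    · unfold colG
      apply List.map_congr_left
      intro r _
      cases r <;> simp
    · apply List.map_congr_left
      intro j _
      unfold colG
      simp only [Function.comp_def, List.map_map]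
      apply List.map_congr_left
      intro r _
      exact (getD_succ_tail r j "").symm
termination_by (m.map List.length).sum
decreasing_by
  simp only [List.map_map]
  refine List.sum_lt_sum _ _ (fun r _ => ?_) ?_
  · cases r <;> simp
  · obtain ⟨r, hr⟩ := List.exists_mem_of_ne_nil m h1
    refine ⟨r, hr, ?_⟩
    have := hall r hr
    cases r <;> simp_all

theorem transpose_eq (m : List (List String)) :
    transpose_matrix m = (List.range (minW m)).map (colG m) := by
  rw [transpose_matrix, pyzip_eq]
  simp

-- the common normal form of both ports' default path:
-- each row rebuilt cell by cell, duplicating cells of all-dot columns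
def rcell (matrix : List (List String)) (w : Nat) (row : List String) : List String :=
  (List.range w).flatMap (fun j =>
    if matrix.all (fun r => r.getD j "" == ".") then [row.getD j "", row.getD j ""]
    else [row.getD j ""])

theorem all_dupF (m : List (List String)) (p : List String → Bool) :
    (dupF m).all p = m.all p := by
  rw [Bool.eq_iff_iff]
  simp only [List.all_eq_true]
  exact ⟨fun h r hr => h r (mem_dupF.2 hr), fun h r hr => h r (mem_dupF.1 hr)⟩

theorem minW_const (l : List (List String)) (n : Nat) (hne : l ≠ [])
    (h : ∀ r ∈ l, r.length = n) : minW l = n := by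
  unfold minW
  have : (l.map List.length).min? = some n := by
    rw [List.min?_eq_some_iff]
    obtain ⟨r, hr⟩ := List.exists_mem_of_ne_nil l hne
    constructor
    · simp only [List.mem_map]; exact ⟨r, hr, h r hr⟩
    · intro b hb
      simp only [List.mem_map] at hb
      obtain ⟨r', hr', rfl⟩ := hb
      rw [h r' hr']
  simp [this]

theorem map_range_getD (l : List (List String)) (F : List String → List String) :
    (List.range l.length).map (fun i => F (l.getD i [])) = l.map F := by
  apply List.ext_getElem
  · simp
  · intro i h1 h2
    simp only [List.getElem_map, List.getElem_range]
    rw [List.getD_eq_getElem l [] (by simpa using h1)]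

theorem getD_colG (m : List (List String)) (j i : Nat) (h : i < m.length) :
    (colG m j).getD i "" = (m.getD i []).getD j "" := by
  unfold colG
  rw [List.getD_eq_getElem _ "" (by simpa using h), List.getD_eq_getElem m [] h]
  simp

theorem length_colG (m : List (List String)) (j : Nat) : (colG m j).length = m.length := by
  simp [colG]

theorem expand_false (m : List (List String)) :
    expand_space m false = transpose_matrix (dupF (transpose_matrix (dupF m))) := by
  rw [expand_space, loopA, expand_true]

-- each column of the row-expanded matrix, read at row i, is a cell of the original row i
theorem colG_dup_eq (matrix : List (List String)) (i : Nat)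
    (hi : i < (dupF matrix).length) :
    colG (dupF ((List.range (minW matrix)).map (colG (dupF matrix)))) i =
      rcell matrix (minW matrix) ((dupF matrix).getD i []) := by
  calc colG (dupF ((List.range (minW matrix)).map (colG (dupF matrix)))) i
      = (((List.range (minW matrix)).map (colG (dupF matrix))).flatMap gdup).map
          (fun r => r.getD i "") := rfl
    _ = ((List.range (minW matrix)).map (colG (dupF matrix))).flatMap
          (fun c => (gdup c).map (fun r => r.getD i "")) := List.map_flatMap
    _ = (List.range (minW matrix)).flatMap
          (fun j => (gdup (colG (dupF matrix) j)).map (fun r => r.getD i "")) := by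
        rw [List.flatMap_map]
    _ = rcell matrix (minW matrix) ((dupF matrix).getD i []) := by
        unfold rcell
        apply List.flatMap_congr
        intro j _
        have h1 : (gdup (colG (dupF matrix) j)).map (fun r => r.getD i "") =
            if (colG (dupF matrix) j).all (fun c => c == ".") then
              [(colG (dupF matrix) j).getD i "", (colG (dupF matrix) j).getD i ""]
            else [(colG (dupF matrix) j).getD i ""] := by
          unfold gdup; split <;> simp
        have h2 : (colG (dupF matrix) j).all (fun c => c == ".") =
            matrix.all (fun r => r.getD j "" == ".") := by
          unfold colG
          rw [List.all_map, all_dupF]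
          rfl
        rw [h1, getD_colG (dupF matrix) j i hi, h2]

-- A-side normal form in the main case
theorem A_main (matrix : List (List String)) (hw : minW matrix ≠ 0) :
    expand_space matrix false =
      matrix.flatMap (fun row => (gdup row).map (rcell matrix (minW matrix))) := by
  rw [expand_false, transpose_eq (dupF matrix), minW_dupF, transpose_eq]
  have hX : minW (dupF ((List.range (minW matrix)).map (colG (dupF matrix)))) =
      (dupF matrix).length := by
    rw [minW_dupF]
    apply minW_const
    · simp only [ne_eq, List.map_eq_nil_iff, List.range_eq_nil]
      exact hw
    · intro r hr
      simp only [List.mem_map] at hr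
      obtain ⟨j, _, rfl⟩ := hr
      exact length_colG _ j
  rw [hX]
  have : (List.range (dupF matrix).length).map
        (colG (dupF ((List.range (minW matrix)).map (colG (dupF matrix))))) =
      (List.range (dupF matrix).length).map
        (fun i => rcell matrix (minW matrix) ((dupF matrix).getD i [])) := by
    apply List.map_congr_left
    intro i hi
    exact colG_dup_eq matrix i (by simpa using hi)
  rw [this, map_range_getD, dupF, List.map_flatMap]

-- B's loop, folded into flatMap form (new_row abstracted as a function of the row)
theorem loopB (m : List (List String)) (NR : List String → List String) :
    m.foldl (fun out row =>
      let new_row := NR row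
      let out' := out ++ [new_row]
      if row.all (fun c => c == ".") then out' ++ [new_row] else out') [] =
    m.flatMap (fun row => (gdup row).map NR) := by
  have : (fun (out : List (List String)) (row : List String) =>
      let new_row := NR row
      let out' := out ++ [new_row]
      if row.all (fun c => c == ".") then out' ++ [new_row] else out')
      = fun out row => out ++ (gdup row).map NR := by
    funext out row
    simp only [gdup]
    split_ifs <;> simp
  rw [this, PySem.List.foldl_append_eq_flatMap]
  simp

-- membership in B's empty-column set equals the all-dot column test (for indices below the width)
theorem empty_cols_mem (matrix : List (List String)) (k : Nat) (hk : k < minW matrix) :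
    PySem.Set.contains (PySem.Set.ofList
      (((PySem.List.enumerate (pyzip matrix)).filter
          (fun p => p.2.all (fun c => c == "."))).map (fun p => p.1))) ((k : Nat) : Int) =
    matrix.all (fun r => r.getD k "" == ".") := by
  rw [Bool.eq_iff_iff]
  rw [show (PySem.Set.contains (PySem.Set.ofList
      (((PySem.List.enumerate (pyzip matrix)).filter
          (fun p => p.2.all (fun c => c == "."))).map (fun p => p.1))) ((k : Nat) : Int) = true) ↔
      (((k : Nat) : Int) ∈ PySem.Set.ofList
      (((PySem.List.enumerate (pyzip matrix)).filter
          (fun p => p.2.all (fun c => c == "."))).map (fun p => p.1))) from by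
    simp [PySem.Set.contains]]
  rw [PySem.Set.mem_ofList, pyzip_eq]
  simp only [List.mem_map, List.mem_filter, PySem.List.mem_enumerate_iff]
  constructor
  · rintro ⟨⟨j, col⟩, ⟨⟨k', hk', hpk⟩, hall⟩, hj⟩
    rw [Prod.mk.injEq] at hpk
    obtain ⟨h1, h2⟩ := hpk
    simp only at hj
    have hkk : k' = k := by
      have : ((k' : Int)) = (k : Int) := by rw [h1] at hj; simpa using hj
      exact_mod_cast this
    subst hkk
    subst h2
    simp only [List.getElem_map, List.getElem_range] at hall
    unfold colG at hall
    rw [List.all_map] at hall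
    simpa using hall
  · intro hall
    have hk' : k < ((List.range (minW matrix)).map (colG matrix)).length := by simpa using hk
    refine ⟨((k : Int), colG matrix k), ⟨⟨k, hk', ?_⟩, ?_⟩, rfl⟩
    · simp
    · unfold colG
      rw [List.all_map]
      simpa using hall

-- B-side normal form (any matrix, ret = false)
theorem B_main (matrix : List (List String)) :
    expand_space_alt matrix false =
      matrix.flatMap (fun row => (gdup row).map (rcell matrix (minW matrix))) := by
  unfold expand_space_alt
  rw [if_neg (by simp)]
  rw [loopB]
  apply List.flatMap_congr
  intro row _
  congr 1
  funext r
  -- show B's new_row computation equals rcell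
  have hlen : PySem.List.len (pyzip matrix) = ((minW matrix : Nat) : Int) := by
    rw [pyzip_eq]; simp [PySem.List.len_eq]
  rw [hlen]
  unfold rcell
  rw [PySem.List.pyRange_zero_natCast, List.flatMap_map]
  apply List.flatMap_congr
  intro k hk
  have hk' : k < minW matrix := by simpa using hk
  rw [empty_cols_mem matrix k hk']
  simp

-- ===== VERDICT (by name: the statement is the Claim_ definition above) =====
theorem expand_space_spec : Claim_equal_expand_space := by
  intro matrix ret _ hpre
  unfold Spec_expand_space
  cases ret
  case false =>
    by_cases hne : matrix = []
    · subst hne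
      rw [expand_false]
      simp [dupF, transpose_eq, minW, expand_space_alt]
    · have hnil : ¬ ([] ∈ matrix) := by
        rcases hpre with h | h
        · exact absurd h (by simp)
        · exact h
      have hw : minW matrix ≠ 0 := by
        intro h0
        unfold minW at h0
        rcases hmin : (matrix.map List.length).min? with _ | k
        · rw [List.min?_eq_none_iff] at hmin; simp_all
        · rw [hmin] at h0
          simp only [Option.getD_some] at h0
          subst h0
          rw [List.min?_eq_some_iff] at hmin
          obtain ⟨h1, _⟩ := hmin
          simp only [List.mem_map] at h1
          obtain ⟨r, hr, hrl⟩ := h1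
          exact hnil (by rwa [List.length_eq_zero_iff.mp hrl] at hr)
      rw [A_main matrix hw, B_main]
  case true =>
    rw [expand_true]
    rfl
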